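-- pv_equiv track=rewrite | github.com/pypi-data/pypi-mirror-274 | packages/proBait/probait-0.1.0.tar.gz/probait-0.1.0/proBait/map_utils.py | determine_interval_baits
-- ===== SOURCE A (Python) =====
-- import math
--
-- def determine_small_bait(span, bait_size, start,
--                          stop, sequence_length):
--     """Determine baits for regions shorter than bait length.
--
--     Parameters
--     ----------
--     span : int
--         Length of the region that is not covered.
--     bait_size : int
--         Bait size in bases.
--     start : int
--         Start position of the subsequence that is
--         not covered.
--     stop : int
--         Stop position of the subsequence that is
--         not covered.
--     sequence_length : int
--         Total length of the sequence.
--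
--     Returns
--     -------
--     bait_interval : list
--         List with the start and stop position for
--         the determined bait.
--     """
--     # Bait size is larger than uncovered interval
--     # Determine number of bait bases in excess
--     rest = bait_size - span
--     bot = math.floor(rest / 2)
--     top = math.ceil(rest / 2)
--     # Uncovered region starts at sequence start
--     if start == 0:
--         bait_interval = [start, start + bait_size]
--     # Centering the bait leads to negative start
--     elif (start - bot) < 0:
--         bait_interval = [0, top+(bot-start)]
--     # Centering the bait leads to stop larger than total sequence
--     elif (stop + top) > sequence_length:
--         bait_interval = [start-(bot+(top-(sequence_length-stop))), sequence_length]
--     # Center bait to get same overlap on both sides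
--     else:
--         bait_interval = [start-bot, stop+top]
--
--     return bait_interval
--
-- def determine_interval_baits(bait_size, bait_offset, start, stop, total_len):
--     """Determine baits for regions with length equal or greater than bait size.
--
--     Parameters
--     ----------
--     bait_size : int
--         Bait size in bases.
--     start : int
--         Start position of the subsequence that is
--         not covered.
--     stop : int
--         Stop position of the subsequence that is
--         not covered.
--
--     Returns
--     -------
--     baits : list of list
--         List with one sublist per determined bait.
--         Each sublist has the start and stop position
--         for a bait.
--     """
--     baits = []
--     reach = False
--     while reach is False:
--         # Remaining interval has length equal or greater than bait size
--         if (start + bait_size) >= stop: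
--             span = stop - start
--             bait_interval = determine_small_bait(span, bait_size,
--                                                  start, stop, total_len)
--             reach = True
--         elif (start + bait_size) < stop:
--             bait_interval = [start, start+bait_size]
--             start = start + bait_offset
--         baits.append(bait_interval)
--
--     return baits
-- ===== SOURCE B (Python) =====
-- def determine_small_bait(span, bait_size, start, stop, sequence_length):
--     rest = bait_size - span
--     bot = rest // 2          # == math.floor(rest/2) for ints of this magnitude
--     top = rest - bot         # == math.ceil(rest/2)
--     if start == 0:
--         return [start, start + bait_size]
--     if start - bot < 0:
--         return [0, top + (bot - start)]
--     if stop + top > sequence_length: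
--         return [start - (bot + (top - (sequence_length - stop))), sequence_length]
--     return [start - bot, stop + top]
--
--
-- def determine_interval_baits(bait_size, bait_offset, start, stop, total_len):
--     d = stop - start - bait_size
--     # number of full-size baits = ceil(d / bait_offset) when the region is
--     # longer than one bait, else 0
--     count = -((-d) // bait_offset) if d > 0 else 0
--     baits = [[start + k * bait_offset, start + k * bait_offset + bait_size]
--              for k in range(count)]
--     final_start = start + count * bait_offset
--     baits.append(determine_small_bait(stop - final_start, bait_size,
--                                       final_start, stop, total_len))
--     return baits
-- ===== Notes on version B (the rewrite author's own statement) =====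
-- stated objective: alternative
-- what changed: The iterate-until-reach while-loop over a mutated start is replaced by a closed-form ceiling-division count of full-size baits, a range comprehension materializing them, and one final small-bait call at start + count*offset.
import Mathlib
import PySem

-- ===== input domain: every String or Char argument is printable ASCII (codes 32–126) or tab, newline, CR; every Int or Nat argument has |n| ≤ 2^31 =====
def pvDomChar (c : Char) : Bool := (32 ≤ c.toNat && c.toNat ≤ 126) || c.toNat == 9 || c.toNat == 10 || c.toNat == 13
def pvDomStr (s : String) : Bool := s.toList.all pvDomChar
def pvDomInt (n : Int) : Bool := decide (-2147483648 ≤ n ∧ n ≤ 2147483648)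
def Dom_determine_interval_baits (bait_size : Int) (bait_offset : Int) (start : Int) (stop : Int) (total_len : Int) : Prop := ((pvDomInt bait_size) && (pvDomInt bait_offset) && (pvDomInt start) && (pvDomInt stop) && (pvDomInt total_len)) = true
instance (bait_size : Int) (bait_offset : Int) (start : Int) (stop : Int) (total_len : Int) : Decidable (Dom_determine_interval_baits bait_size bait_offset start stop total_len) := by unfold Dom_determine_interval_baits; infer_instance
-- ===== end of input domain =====

-- B replaces A's iterate-until-reach while-loop by a closed-form ceiling-division
-- count of full-size baits plus a range comprehension (objective: alternative).

-- ===== PORT A =====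
-- math.floor(rest/2) / math.ceil(rest/2): exact as integer floor/ceil division by 2
-- on the Dom range (|rest| ≤ 2^33 << 2^53, so the float division is exact).
def determine_small_bait (span : Int) (bait_size : Int) (start : Int) (stop : Int) (sequence_length : Int) : List Int :=
  let rest := bait_size - span
  let bot := PySem.Int.floordiv rest 2
  let top := -(PySem.Int.floordiv (-rest) 2)
  if start = 0 then [start, start + bait_size]
  else if start - bot < 0 then [0, top + (bot - start)]
  else if stop + top > sequence_length then [start - (bot + (top - (sequence_length - stop))), sequence_length]
  else [start - bot, stop + top]

-- A's while-loop; the `else acc` branch is only a totality guard: the Python loop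
-- never terminates there (bait_offset ≤ 0 with start+bait_size < stop), outside Pre_.
def da_loop (bait_size : Int) (bait_offset : Int) (stop : Int) (total_len : Int) (start : Int) (acc : List (List Int)) : List (List Int) :=
  if _h1 : stop ≤ start + bait_size then
    acc ++ [determine_small_bait (stop - start) bait_size start stop total_len]
  else if _h2 : 0 < bait_offset then
    da_loop bait_size bait_offset stop total_len (start + bait_offset) (acc ++ [[start, start + bait_size]])
  else acc
termination_by (stop - start - bait_size).toNat
decreasing_by omega

def determine_interval_baits (bait_size : Int) (bait_offset : Int) (start : Int) (stop : Int) (total_len : Int) : List (List Int) :=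
  da_loop bait_size bait_offset stop total_len start []

-- ===== PORT B =====
def determine_small_bait_alt (span : Int) (bait_size : Int) (start : Int) (stop : Int) (sequence_length : Int) : List Int :=
  let rest := bait_size - span
  let bot := PySem.Int.floordiv rest 2
  let top := rest - bot
  if start = 0 then [start, start + bait_size]
  else if start - bot < 0 then [0, top + (bot - start)]
  else if stop + top > sequence_length then [start - (bot + (top - (sequence_length - stop))), sequence_length]
  else [start - bot, stop + top]

def determine_interval_baits_alt (bait_size : Int) (bait_offset : Int) (start : Int) (stop : Int) (total_len : Int) : List (List Int) :=
  let d := stop - start - bait_size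
  let count := if 0 < d then -(PySem.Int.floordiv (-d) bait_offset) else 0
  let baits := (PySem.List.pyRange 0 count 1).map
    (fun k => [start + k * bait_offset, start + k * bait_offset + bait_size])
  let final_start := start + count * bait_offset
  baits ++ [determine_small_bait_alt (stop - final_start) bait_size final_start stop total_len]

-- ===== PRECONDITION & SPEC =====
-- Pre_ excludes exactly the inputs where A's while-loop never terminates:
-- start + bait_size < stop together with bait_offset ≤ 0 (start never advances past stop).
def Pre_determine_interval_baits (bait_size : Int) (bait_offset : Int) (start : Int) (stop : Int) (total_len : Int) : Prop :=
  stop ≤ start + bait_size ∨ 0 < bait_offset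
instance (bait_size : Int) (bait_offset : Int) (start : Int) (stop : Int) (total_len : Int) : Decidable (Pre_determine_interval_baits bait_size bait_offset start stop total_len) := by unfold Pre_determine_interval_baits; infer_instance

def pvWitness_determine_interval_baits : Int × Int × Int × Int × Int := (120, 60, 0, 300, 500)

def Spec_determine_interval_baits (bait_size : Int) (bait_offset : Int) (start : Int) (stop : Int) (total_len : Int) (out : List (List Int)) : Prop := out = determine_interval_baits_alt bait_size bait_offset start stop total_len
instance (bait_size : Int) (bait_offset : Int) (start : Int) (stop : Int) (total_len : Int) (out : List (List Int)) : Decidable (Spec_determine_interval_baits bait_size bait_offset start stop total_len out) := by unfold Spec_determine_interval_baits; infer_instance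

-- ===== CLAIM (what is proved, stated in full; the proofs are below) =====
def Claim_equal_determine_interval_baits : Prop := ∀ (bait_size : Int) (bait_offset : Int) (start : Int) (stop : Int) (total_len : Int), Dom_determine_interval_baits bait_size bait_offset start stop total_len → Pre_determine_interval_baits bait_size bait_offset start stop total_len → Spec_determine_interval_baits bait_size bait_offset start stop total_len (determine_interval_baits bait_size bait_offset start stop total_len)

-- ===== LEMMAS AND PROOFS =====

-- ceil(rest/2) computed as -((-rest)//2) equals rest - rest//2
lemma small_bait_eq (span bait_size start stop sequence_length : Int) :
    determine_small_bait span bait_size start stop sequence_length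
      = determine_small_bait_alt span bait_size start stop sequence_length := by
  have hceil : ∀ r : Int, -(PySem.Int.floordiv (-r) 2) = r - PySem.Int.floordiv r 2 := by
    intro r
    rw [PySem.Int.floordiv_eq_ediv_of_pos (by norm_num), PySem.Int.floordiv_eq_ediv_of_pos (by norm_num)]
    omega
  simp only [determine_small_bait, determine_small_bait_alt, hceil]

lemma alt_terminal (bait_size bait_offset start stop total_len : Int)
    (h : stop ≤ start + bait_size) :
    determine_interval_baits_alt bait_size bait_offset start stop total_len
      = [determine_small_bait_alt (stop - start) bait_size start stop total_len] := by
  have hd : ¬ (0 < stop - start - bait_size) := by omega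
  simp only [determine_interval_baits_alt, if_neg hd,
    PySem.List.pyRange_one_eq_nil (le_refl (0 : Int)), List.map_nil, List.nil_append,
    zero_mul, add_zero]

lemma alt_step (bait_size bait_offset start stop total_len : Int)
    (h : ¬ stop ≤ start + bait_size) (hoff : 0 < bait_offset) :
    determine_interval_baits_alt bait_size bait_offset start stop total_len
      = [start, start + bait_size] ::
        determine_interval_baits_alt bait_size bait_offset (start + bait_offset) stop total_len := by
  have hd : 0 < stop - start - bait_size := by omega
  set d : Int := stop - start - bait_size with hdd
  set c : Int := -(PySem.Int.floordiv (-d) bait_offset) with hcc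
  have hcs : (c - 1) * bait_offset < d ∧ d ≤ c * bait_offset :=
    (PySem.Int.neg_floordiv_neg_eq_iff_of_pos hoff).mp hcc.symm
  have hc1 : 1 ≤ c := by nlinarith [hcs.1, hcs.2]
  by_cases hd' : 0 < stop - (start + bait_offset) - bait_size
  · -- at least one more full-size bait remains: count decreases by exactly one
    have hc' : -(PySem.Int.floordiv (-(stop - (start + bait_offset) - bait_size)) bait_offset) = c - 1 := by
      rw [PySem.Int.neg_floordiv_neg_eq_iff_of_pos hoff]
      constructor <;> [linarith [hcs.1]; linarith [hcs.2]]
    simp only [determine_interval_baits_alt, if_pos hd, if_pos hd', ← hdd, ← hcc, hc']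
    rw [PySem.List.pyRange_one_cons (by omega : (0:Int) < c),
        PySem.List.pyRange_one, PySem.List.pyRange_one]
    have hlen : (c - (0 + 1)).toNat = (c - 1 - 0).toNat := by omega
    have hfin : start + c * bait_offset = start + bait_offset + (c - 1) * bait_offset := by ring
    rw [hlen, hfin]
    simp only [List.map_cons, List.map_map, List.cons_append, List.cons.injEq]
    refine ⟨by norm_num, congrArg (· ++ _) ?_⟩
    refine List.map_congr_left fun k _ => ?_
    simp only [Function.comp_apply, List.cons.injEq, and_true]
    constructor <;> push_cast <;> ring
  · -- last full-size bait: count at the advanced start is zero, so c = 1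
    have hcle : c ≤ 1 := by nlinarith [hcs.1]
    have hc : c = 1 := le_antisymm hcle hc1
    simp only [determine_interval_baits_alt, if_pos hd, if_neg hd', ← hdd, ← hcc, hc]
    rw [PySem.List.pyRange_one, PySem.List.pyRange_one_eq_nil (le_refl (0 : Int))]
    norm_num

lemma da_loop_eq (bait_size bait_offset total_len : Int) :
    ∀ (n : Nat) (start stop : Int) (acc : List (List Int)),
    (stop - start - bait_size).toNat ≤ n →
    (stop ≤ start + bait_size ∨ 0 < bait_offset) →
    da_loop bait_size bait_offset stop total_len start acc
      = acc ++ determine_interval_baits_alt bait_size bait_offset start stop total_len := by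
  intro n
  induction n with
  | zero =>
    intro start stop acc hn hpre
    have hterm : stop ≤ start + bait_size := by omega
    rw [da_loop, dif_pos hterm, alt_terminal _ _ _ _ _ hterm, small_bait_eq]
  | succ n ih =>
    intro start stop acc hn hpre
    by_cases hterm : stop ≤ start + bait_size
    · rw [da_loop, dif_pos hterm, alt_terminal _ _ _ _ _ hterm, small_bait_eq]
    · have hoff : 0 < bait_offset := by tauto
      rw [da_loop, dif_neg hterm, dif_pos hoff,
          ih (start + bait_offset) stop _ (by omega) (Or.inr hoff),
          alt_step _ _ _ _ _ hterm hoff]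
      simp

-- ===== VERDICT (by name: the statement is the Claim_ definition above) =====
theorem determine_interval_baits_spec : Claim_equal_determine_interval_baits := by
  intro bait_size bait_offset start stop total_len _hdom hpre
  unfold Spec_determine_interval_baits determine_interval_baits
  exact da_loop_eq bait_size bait_offset total_len _ start stop [] le_rfl hpre
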